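-- pv_equiv track=rewrite | github.com/Heterogeneous-Semantic-Segmentation/Utilities-for-The-Frugal-Labeler | MFTFL/create_one_hot_encoded_map_from_mask.py | get_color_smallest_distance
-- ===== SOURCE A (Python) =====
-- def get_color_smallest_distance(color,color_map):
--     '''
--     Given a color (first parameter) this function gets the color from the color_map (second parameter) which is the
--     closest to the given color.
--     '''
--     smallest_dist = abs(sum(color) - sum(color_map[0]))
--     smallest_index = 0
--     for i in range(1,len(color_map)):
--         if abs(sum(color) - sum(color_map[i])) < smallest_dist:
--             smallest_dist = abs(sum(color) - sum(color_map[i]))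
--             smallest_index = i
--     return color_map[smallest_index]
-- ===== SOURCE B (Python) =====
-- def get_color_smallest_distance(color, color_map):
--     '''
--     Given a color (first parameter) this function gets the color from the color_map (second parameter) which is the
--     closest to the given color.
--     '''
--     s = sum(color)
--     ordered = sorted(color_map, key=lambda c: abs(s - sum(c)))
--     return ordered[0]
-- ===== Notes on version B (the rewrite author's own statement) =====
-- stated objective: alternative
-- what changed: Replaces the fused running-min index-tracking scan by stable-sorting the whole palette on distance-to-target and returning the head; stability gives the same first-index tie-breaking, and sum(color)/each row sum is computed once as the sort key instead of on every comparison.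
import Mathlib
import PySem

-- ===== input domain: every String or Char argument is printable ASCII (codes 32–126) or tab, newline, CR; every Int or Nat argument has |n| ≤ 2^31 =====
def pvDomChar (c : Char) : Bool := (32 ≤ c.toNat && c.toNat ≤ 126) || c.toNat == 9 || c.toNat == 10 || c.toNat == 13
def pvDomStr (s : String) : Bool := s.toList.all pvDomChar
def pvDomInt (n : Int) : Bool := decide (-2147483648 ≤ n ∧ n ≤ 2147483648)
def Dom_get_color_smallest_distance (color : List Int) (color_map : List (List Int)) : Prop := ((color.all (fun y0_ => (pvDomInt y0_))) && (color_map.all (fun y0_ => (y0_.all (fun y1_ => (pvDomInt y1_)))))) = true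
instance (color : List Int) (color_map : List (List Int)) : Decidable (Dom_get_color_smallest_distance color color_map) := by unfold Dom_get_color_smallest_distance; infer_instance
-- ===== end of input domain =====

-- B stable-sorts the palette by distance to the target sum and returns the head (same first-index tie-breaking by stability), instead of A's fused running-min scan; an alternative decomposition, not claimed faster.

-- ===== PORT A =====
-- fused scan: track (smallest_dist, smallest_index) over range(1, len(color_map))
def get_color_smallest_distance (color : List Int) (color_map : List (List Int)) : List Int :=
  let smallest_dist : Int := |color.sum - (PySem.List.pyGetD color_map 0 []).sum|
  let st := (PySem.List.pyRange 1 (color_map.length : Int) 1).foldl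
    (fun (st : Int × Int) i =>
      if |color.sum - (PySem.List.pyGetD color_map i []).sum| < st.1 then
        (|color.sum - (PySem.List.pyGetD color_map i []).sum|, i)
      else st)
    (smallest_dist, 0)
  PySem.List.pyGetD color_map st.2 []

-- ===== PORT B =====
-- stable sort by distance key, then take the first element
def get_color_smallest_distance_alt (color : List Int) (color_map : List (List Int)) : List Int :=
  let s : Int := color.sum
  let ordered := PySem.List.sorted color_map (fun c => |s - c.sum|)
  PySem.List.pyGetD ordered 0 []

-- ===== PRECONDITION & SPEC =====
-- A indexes color_map[0]: Pre_ excludes the empty color_map, on which A raises IndexError (and B's ordered[0] raises IndexError too).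
def Pre_get_color_smallest_distance (color : List Int) (color_map : List (List Int)) : Prop := color_map ≠ []
instance (color : List Int) (color_map : List (List Int)) : Decidable (Pre_get_color_smallest_distance color color_map) := by unfold Pre_get_color_smallest_distance; infer_instance

def pvWitness_get_color_smallest_distance : List Int × List (List Int) := ([1, 2], [[0, 0], [1, 1], [5]])

def Spec_get_color_smallest_distance (color : List Int) (color_map : List (List Int)) (out : List Int) : Prop := out = get_color_smallest_distance_alt color color_map
instance (color : List Int) (color_map : List (List Int)) (out : List Int) : Decidable (Spec_get_color_smallest_distance color color_map out) := by unfold Spec_get_color_smallest_distance; infer_instance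

-- ===== CLAIM (what is proved, stated in full; the proofs are below) =====
def Claim_equal_get_color_smallest_distance : Prop := ∀ (color : List Int) (color_map : List (List Int)), Dom_get_color_smallest_distance color color_map → Pre_get_color_smallest_distance color color_map → Spec_get_color_smallest_distance color color_map (get_color_smallest_distance color color_map)

-- ===== LEMMAS AND PROOFS =====

-- loop invariant for A's fold: after processing range(1, j) the state is
-- (f cm[k], k) with k the first index of the minimum of f over cm[0..j)
theorem aLoop_inv (cm : List (List Int)) (f : List Int → Int) :
    ∀ (j : Nat) (h1 : 1 ≤ j) (hj : j ≤ cm.length),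
    ∃ (k : Nat) (hk : k < j),
      ((PySem.List.pyRange 1 (j : Int) 1).foldl
        (fun (st : Int × Int) i =>
          if f (PySem.List.pyGetD cm i []) < st.1 then (f (PySem.List.pyGetD cm i []), i) else st)
        (f (PySem.List.pyGetD cm 0 []), 0)) = (f (cm[k]'(by omega)), (k : Int)) ∧
      (∀ i (hi : i < j), f (cm[k]'(by omega)) ≤ f (cm[i]'(by omega))) ∧
      (∀ i (hi : i < k), f (cm[k]'(by omega)) < f (cm[i]'(by omega))) := by
  intro j
  induction j with
  | zero => omega
  | succ n ih =>
    intro h1 hj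
    have hget0 : PySem.List.pyGetD cm 0 [] = cm[0]'(by omega) := by
      rw [show ((0:Int)) = ((0:Nat):Int) from rfl, PySem.List.pyGetD_natCast]
      simp [List.getD, List.getElem?_eq_getElem (show 0 < cm.length by omega)]
    by_cases hn : n = 0
    · subst hn
      refine ⟨0, by omega, ?_, ?_, ?_⟩
      · have : ((0 + 1 : Nat) : Int) = 1 := by norm_num
        rw [this, PySem.List.pyRange_one_eq_nil (by norm_num), List.foldl_nil, hget0]
        norm_num
      · intro i hi
        interval_cases i
        exact le_refl _
      · intro i hi
        omega
    · have hcast : ((n + 1 : Nat) : Int) = (n : Int) + 1 := by push_cast; ring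
      obtain ⟨k, hk, heq, hmin, hfirst⟩ := ih (by omega) (by omega)
      have hgetn : PySem.List.pyGetD cm (n : Int) [] = cm[n]'(by omega) := by
        rw [PySem.List.pyGetD_natCast]
        simp [List.getD, List.getElem?_eq_getElem (show n < cm.length by omega)]
      rw [hcast, PySem.List.pyRange_one_succ_right (by exact_mod_cast Nat.one_le_iff_ne_zero.mpr hn),
        List.foldl_append, heq, List.foldl_cons, List.foldl_nil, hgetn]
      by_cases hlt : f (cm[n]'(by omega)) < f (cm[k]'(by omega))
      · rw [if_pos hlt]
        refine ⟨n, by omega, rfl, ?_, ?_⟩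
        · intro i hi
          rcases Nat.lt_succ_iff_lt_or_eq.mp hi with hi' | rfl
          · exact le_of_lt (lt_of_lt_of_le hlt (hmin i hi'))
          · exact le_refl _
        · intro i hi
          exact lt_of_lt_of_le hlt (hmin i (by omega))
      · rw [if_neg hlt]
        refine ⟨k, by omega, rfl, ?_, fun i hi => hfirst i hi⟩
        intro i hi
        rcases Nat.lt_succ_iff_lt_or_eq.mp hi with hi' | rfl
        · exact hmin i hi'
        · exact not_lt.mp hlt

-- head of the insertion-sort accumulator evolves like a running strict-min
theorem foldl_ins_head {α : Type} (f : α → Int) :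
    ∀ (xs : List α) (m : α) (t : List α),
    ∃ t', xs.foldl (fun acc x => PySem.List.insertBy (fun a b => decide (f a < f b)) x acc) (m :: t)
        = (xs.foldl (fun b y => if f y < f b then y else b) m) :: t' := by
  intro xs
  induction xs with
  | nil => intro m t; exact ⟨t, rfl⟩
  | cons x xs ih =>
    intro m t
    simp only [List.foldl_cons]
    by_cases h : f x < f m
    · have hins : PySem.List.insertBy (fun a b => decide (f a < f b)) x (m :: t) = x :: m :: t := by
        simp [PySem.List.insertBy, h]
      rw [hins, if_pos h]
      exact ih x (m :: t)
    · have hins : PySem.List.insertBy (fun a b => decide (f a < f b)) x (m :: t)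
          = m :: PySem.List.insertBy (fun a b => decide (f a < f b)) x t := by
        simp [PySem.List.insertBy, h]
      rw [hins, if_neg h]
      exact ih m _

-- the running strict-min over a::xs is the first argmin of a::xs
theorem runMin_char {α : Type} (f : α → Int) :
    ∀ (xs : List α) (a : α),
    ∃ (k : Nat) (hk : k < (a :: xs).length),
      xs.foldl (fun b y => if f y < f b then y else b) a = (a :: xs)[k] ∧
      (∀ i (hi : i < (a :: xs).length), f ((a :: xs)[k]) ≤ f ((a :: xs)[i]'hi)) ∧
      (∀ i (hi : i < k), f ((a :: xs)[k]) < f ((a :: xs)[i]'(by omega))) := by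
  intro xs
  induction xs using List.reverseRecOn with
  | nil =>
    intro a
    refine ⟨0, by simp, rfl, ?_, ?_⟩
    · intro i hi
      simp at hi
      subst hi
      exact le_refl _
    · intro i hi
      omega
  | append_singleton ys y ih =>
    intro a
    obtain ⟨k, hk, heq, hmin, hfirst⟩ := ih a
    have hgy : ∀ (h : (a :: ys).length < ((a :: ys) ++ [y]).length),
        ((a :: ys) ++ [y])[(a :: ys).length]'h = y := fun h => List.getElem_concat_length rfl h
    have hgi : ∀ i (hi : i < (a :: ys).length) (h : i < ((a :: ys) ++ [y]).length),
        ((a :: ys) ++ [y])[i]'h = (a :: ys)[i]'hi := fun i hi h => List.getElem_append_left hi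
    simp only [List.foldl_append, List.foldl_cons, List.foldl_nil, heq, ← List.cons_append]
    by_cases hlt : f y < f ((a :: ys)[k])
    · refine ⟨(a :: ys).length, by simp, ?_, ?_, ?_⟩
      · rw [if_pos hlt, hgy]
      · intro i hi
        rw [hgy]
        by_cases hiL : i < (a :: ys).length
        · rw [hgi i hiL]
          exact le_of_lt (lt_of_lt_of_le hlt (hmin i hiL))
        · have hieq : i = (a :: ys).length := by simp at hi hiL ⊢; omega
          subst hieq
          rw [hgy]
      · intro i hi
        rw [hgy, hgi i hi]
        exact lt_of_lt_of_le hlt (hmin i hi)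
    · refine ⟨k, by simp at hk ⊢; omega, ?_, ?_, ?_⟩
      · rw [if_neg hlt, hgi k hk]
      · intro i hi
        rw [hgi k hk]
        by_cases hiL : i < (a :: ys).length
        · rw [hgi i hiL]
          exact hmin i hiL
        · have hieq : i = (a :: ys).length := by simp at hi hiL ⊢; omega
          subst hieq
          rw [hgy]
          exact not_lt.mp hlt
      · intro i hi
        rw [hgi k hk, hgi i (by omega)]
        exact hfirst i hi

-- ===== VERDICT (by name: the statement is the Claim_ definition above) =====
theorem get_color_smallest_distance_spec : Claim_equal_get_color_smallest_distance := by
  intro color color_map hdom hpre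
  unfold Pre_get_color_smallest_distance at hpre
  unfold Spec_get_color_smallest_distance get_color_smallest_distance get_color_smallest_distance_alt
  dsimp only
  obtain ⟨c0, rest, rfl⟩ : ∃ c0 rest, color_map = c0 :: rest := by
    cases color_map with
    | nil => exact absurd rfl hpre
    | cons c0 rest => exact ⟨c0, rest, rfl⟩
  have hlen : 1 ≤ (c0 :: rest).length := by simp
  set f : List Int → Int := fun c => |color.sum - c.sum| with hf
  obtain ⟨k, hk, heq, hmin, hfirst⟩ := aLoop_inv (c0 :: rest) f (c0 :: rest).length hlen le_rfl
  rw [heq]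
  -- A's result is cm[k]
  have hA : PySem.List.pyGetD (c0 :: rest) ((k : Nat) : Int) [] = (c0 :: rest)[k]'hk := by
    rw [PySem.List.pyGetD_natCast]
    simp [List.getD, List.getElem?_eq_getElem hk]
  rw [hA]
  -- B's result is the head of the stable sort = running strict-min
  rw [PySem.List.sorted_eq_foldl_insertBy]
  simp only [List.foldl_cons]
  have hins0 : PySem.List.insertBy (fun a b => decide (f a < f b)) c0 ([] : List (List Int)) = [c0] := by
    simp [PySem.List.insertBy]
  rw [show (PySem.List.insertBy (fun a b => decide ((fun c => |color.sum - c.sum|) a < (fun c => |color.sum - c.sum|) b)) c0 ([] : List (List Int))) = [c0] from hins0]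
  obtain ⟨t', ht'⟩ := foldl_ins_head f rest c0 []
  rw [ht']
  obtain ⟨k', hk', heq', hmin', hfirst'⟩ := runMin_char f rest c0
  rw [heq']
  have hgd : PySem.List.pyGetD ((c0 :: rest)[k']'hk' :: t') 0 [] = (c0 :: rest)[k']'hk' := by
    rw [show ((0:Int)) = ((0:Nat):Int) from rfl, PySem.List.pyGetD_natCast]
    simp
  rw [hgd]
  -- the two first-argmin indices coincide
  have hkk : k = k' := by
    rcases lt_trichotomy k k' with h | h | h
    · have h1 := hfirst' k h
      have h2 := hmin k' hk'
      omega
    · exact h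
    · have h1 := hfirst k' h
      have h2 := hmin' k hk
      omega
  subst hkk
  rfl
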